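-- pv_equiv track=rewrite | github.com/ShaniCohen/sRNA-BP-cross-species | analysis/analyzer.py | _get_expanded_and_emergent_bp_clusters
-- ===== SOURCE A (Python) =====
-- from typing import Tuple, Set, List, Dict
--
-- def _get_expanded_and_emergent_bp_clusters(common_bp_clusters: List[Tuple[str, str, str]], common_bp_ids: List[Tuple[str, str, str]]) -> Tuple[List[Tuple[str, str, str]], List[Tuple[str, str, str]]]:
--     """_summary_
--
--     Args:
--         common_bp_clusters (List[Tuple[str, str, str]]): list of tuples (cluster_id, bp_id)
--         common_bp_ids (List[Tuple[str, str, str]]): list of tuples (cluster_id, bp_id)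
--
--     Returns:
--         expanded_bp_clusters  (List[Tuple[str, str, str]])
--         emergent_bp_clusters  (List[Tuple[str, str, str]])
--     """
--     expanded_bp_clusters, emergent_bp_clusters = [], []
--     if len(common_bp_clusters) > len(common_bp_ids):
--         new_bps = sorted(set(common_bp_clusters) - set(common_bp_ids))
--         new_clusters = sorted(set([clus for clus, bp, nm in common_bp_clusters]) - set([clus for clus, bp, nm in common_bp_ids]))
--         expanded_bp_clusters = [(clus, bp, nm) for clus, bp, nm in new_bps if clus not in new_clusters]
--         emergent_bp_clusters = [(clus, bp, nm) for clus, bp, nm in new_bps if clus in new_clusters]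
--
--     return expanded_bp_clusters, emergent_bp_clusters
-- ===== SOURCE B (Python) =====
-- from typing import Tuple, List
--
-- def _insort(lst, x):
--     # insert x into the sorted list lst (all elements distinct): before the first y with x < y
--     for i, y in enumerate(lst):
--         if x < y:
--             return lst[:i] + [x] + lst[i:]
--     return lst + [x]
--
-- def _get_expanded_and_emergent_bp_clusters(common_bp_clusters: List[Tuple[str, str, str]], common_bp_ids: List[Tuple[str, str, str]]) -> Tuple[List[Tuple[str, str, str]], List[Tuple[str, str, str]]]:
--     expanded_bp_clusters, emergent_bp_clusters = [], []
--     if len(common_bp_clusters) > len(common_bp_ids):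
--         old = set(common_bp_ids)
--         id_clusters = {clus for clus, bp, nm in common_bp_ids}
--         seen = set()
--         for t in common_bp_clusters:
--             if t in seen or t in old:
--                 continue
--             seen.add(t)
--             if t[0] in id_clusters:
--                 expanded_bp_clusters = _insort(expanded_bp_clusters, t)
--             else:
--                 emergent_bp_clusters = _insort(emergent_bp_clusters, t)
--     return expanded_bp_clusters, emergent_bp_clusters
-- ===== Notes on version B (the rewrite author's own statement) =====
-- stated objective: alternative
-- what changed: Replaces A's staged pipeline (set difference, global sort, second cluster-level set difference, two filter comprehensions) by one pass over the input that dedups with a seen-set, skips old tuples, and inserts each new tuple directly into the appropriate output kept sorted by binary/linear insertion - no sorted-difference intermediate or filters exist in B.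
import Mathlib
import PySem

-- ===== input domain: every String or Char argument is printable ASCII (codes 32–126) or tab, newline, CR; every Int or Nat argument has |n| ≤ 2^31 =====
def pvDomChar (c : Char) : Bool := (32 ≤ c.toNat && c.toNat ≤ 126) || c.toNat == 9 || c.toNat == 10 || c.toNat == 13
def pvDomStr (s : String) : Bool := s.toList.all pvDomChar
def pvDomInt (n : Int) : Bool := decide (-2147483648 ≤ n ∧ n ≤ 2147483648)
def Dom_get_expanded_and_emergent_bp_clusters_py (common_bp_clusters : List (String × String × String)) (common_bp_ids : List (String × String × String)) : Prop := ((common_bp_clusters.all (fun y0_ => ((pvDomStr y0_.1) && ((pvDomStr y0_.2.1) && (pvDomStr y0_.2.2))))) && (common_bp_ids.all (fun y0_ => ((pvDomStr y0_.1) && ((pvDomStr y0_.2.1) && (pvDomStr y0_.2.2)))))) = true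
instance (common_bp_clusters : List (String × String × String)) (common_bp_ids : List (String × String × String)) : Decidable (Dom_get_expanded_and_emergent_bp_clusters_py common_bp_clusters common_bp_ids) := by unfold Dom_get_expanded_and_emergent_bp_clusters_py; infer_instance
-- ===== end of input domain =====

-- B replaces A's staged set-difference/sort/filter pipeline by one dedup-and-insert pass that builds both sorted outputs directly (objective: alternative).


-- ===== PORT A =====
-- Python's '<' on 3-tuples of strings: lexicographic, component by component (exact).
def pvTripLt (a b : String × String × String) : Bool :=
  a.1 < b.1 || (a.1 == b.1 && (a.2.1 < b.2.1 || (a.2.1 == b.2.1 && a.2.2 < b.2.2)))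

-- sorted(...) on string 3-tuples, ported by hand (PySem.List.sorted needs an LT key; Mathlib's Prod
-- '<' is not lexicographic): the same stable insertion sort shape as PySem.List.sorted_eq_foldl_insertBy,
-- with Python's tuple '<' as the comparison — exact on every input.
def pvSortTrip (xs : List (String × String × String)) : List (String × String × String) :=
  xs.foldl (fun acc x => PySem.List.insertBy pvTripLt x acc) []

def get_expanded_and_emergent_bp_clusters_py (common_bp_clusters : List (String × String × String)) (common_bp_ids : List (String × String × String)) : (List (String × String × String)) × (List (String × String × String)) :=
  if common_bp_clusters.length > common_bp_ids.length then
    let new_bps := pvSortTrip (PySem.Set.diff (PySem.Set.ofList common_bp_clusters) common_bp_ids)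
    let new_clusters := PySem.List.sorted (PySem.Set.diff (PySem.Set.ofList (common_bp_clusters.map (fun t => t.1))) (common_bp_ids.map (fun t => t.1))) (fun s => s) false
    (new_bps.filter (fun t => !(new_clusters.contains t.1)),
     new_bps.filter (fun t => new_clusters.contains t.1))
  else ([], [])

-- ===== PORT B =====
-- B's _insort inserts x into a sorted duplicate-free list before the first y with x < y — exactly PySem.List.insertBy pvTripLt.
-- One step of B's loop over the tuples: skip t if already seen or an old tuple; else record it in seen
-- and insert it into the matching sorted output (state = (seen, expanded, emergent)).
def pvBStep (old : PySem.Set (String × String × String)) (idc : PySem.Set String)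
    (st : PySem.Set (String × String × String) × List (String × String × String) × List (String × String × String))
    (t : String × String × String) :
    PySem.Set (String × String × String) × List (String × String × String) × List (String × String × String) :=
  if PySem.Set.contains st.1 t || PySem.Set.contains old t then st
  else (PySem.Set.add st.1 t,
        if PySem.Set.contains idc t.1 then (PySem.List.insertBy pvTripLt t st.2.1, st.2.2)
        else (st.2.1, PySem.List.insertBy pvTripLt t st.2.2))

def get_expanded_and_emergent_bp_clusters_py_alt (common_bp_clusters : List (String × String × String)) (common_bp_ids : List (String × String × String)) : (List (String × String × String)) × (List (String × String × String)) :=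
  if common_bp_clusters.length > common_bp_ids.length then
    let old := PySem.Set.ofList common_bp_ids
    let id_clusters := PySem.Set.ofList (common_bp_ids.map (fun t => t.1))
    let r := common_bp_clusters.foldl (pvBStep old id_clusters) (PySem.Set.empty, [], [])
    (r.2.1, r.2.2)
  else ([], [])

-- ===== PRECONDITION & SPEC =====
def Spec_get_expanded_and_emergent_bp_clusters_py (common_bp_clusters : List (String × String × String)) (common_bp_ids : List (String × String × String)) (out : (List (String × String × String)) × (List (String × String × String))) : Prop := out = get_expanded_and_emergent_bp_clusters_py_alt common_bp_clusters common_bp_ids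
instance (common_bp_clusters : List (String × String × String)) (common_bp_ids : List (String × String × String)) (out : (List (String × String × String)) × (List (String × String × String))) : Decidable (Spec_get_expanded_and_emergent_bp_clusters_py common_bp_clusters common_bp_ids out) := by unfold Spec_get_expanded_and_emergent_bp_clusters_py; infer_instance

-- ===== CLAIM (what is proved, stated in full; the proofs are below) =====
def Claim_equal_get_expanded_and_emergent_bp_clusters_py : Prop := ∀ (common_bp_clusters : List (String × String × String)) (common_bp_ids : List (String × String × String)), Dom_get_expanded_and_emergent_bp_clusters_py common_bp_clusters common_bp_ids → Spec_get_expanded_and_emergent_bp_clusters_py common_bp_clusters common_bp_ids (get_expanded_and_emergent_bp_clusters_py common_bp_clusters common_bp_ids)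

-- ===== LEMMAS AND PROOFS =====

-- pvTripLt is a strict linear order on triples: irreflexive, asymmetric, transitive, total on distinct elements.
lemma pvTripLt_irrefl (a : String × String × String) : pvTripLt a a = false := by
  simp [pvTripLt]

lemma pvTripLt_iff (a b : String × String × String) :
    pvTripLt a b = true ↔ a.1 < b.1 ∨ (a.1 = b.1 ∧ (a.2.1 < b.2.1 ∨ (a.2.1 = b.2.1 ∧ a.2.2 < b.2.2))) := by
  simp [pvTripLt]

lemma pvTripLt_trans {a b c : String × String × String}
    (h1 : pvTripLt a b = true) (h2 : pvTripLt b c = true) : pvTripLt a c = true := by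
  rw [pvTripLt_iff] at *
  rcases h1 with h1 | ⟨e1, h1⟩ <;> rcases h2 with h2 | ⟨e2, h2⟩
  · exact Or.inl (lt_trans h1 h2)
  · exact Or.inl (e2 ▸ h1)
  · exact Or.inl (e1 ▸ h2)
  · refine Or.inr ⟨e1.trans e2, ?_⟩
    rcases h1 with h1 | ⟨f1, h1⟩ <;> rcases h2 with h2 | ⟨f2, h2⟩
    · exact Or.inl (lt_trans h1 h2)
    · exact Or.inl (f2 ▸ h1)
    · exact Or.inl (f1 ▸ h2)
    · exact Or.inr ⟨f1.trans f2, lt_trans h1 h2⟩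

lemma pvTripLt_asymm {a b : String × String × String}
    (h : pvTripLt a b = true) : pvTripLt b a = false := by
  by_contra hc
  have hba : pvTripLt b a = true := by
    cases hb : pvTripLt b a
    · exact absurd hb hc
    · rfl
  have := pvTripLt_trans h hba
  rw [pvTripLt_irrefl] at this
  exact Bool.false_ne_true this

lemma pvTripLt_total {a b : String × String × String} (h : a ≠ b) :
    pvTripLt a b = true ∨ pvTripLt b a = true := by
  rw [pvTripLt_iff, pvTripLt_iff]
  rcases lt_trichotomy a.1 b.1 with h1 | h1 | h1
  · exact Or.inl (Or.inl h1)
  · rcases lt_trichotomy a.2.1 b.2.1 with h2 | h2 | h2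
    · exact Or.inl (Or.inr ⟨h1, Or.inl h2⟩)
    · rcases lt_trichotomy a.2.2 b.2.2 with h3 | h3 | h3
      · exact Or.inl (Or.inr ⟨h1, Or.inr ⟨h2, h3⟩⟩)
      · exact absurd (Prod.ext h1 (Prod.ext h2 h3)) h
      · exact Or.inr (Or.inr ⟨h1.symm, Or.inr ⟨h2.symm, h3⟩⟩)
    · exact Or.inr (Or.inr ⟨h1.symm, Or.inl h2⟩)
  · exact Or.inr (Or.inl h1)

lemma pvTripLt_ne {a b : String × String × String} (h : pvTripLt a b = true) : a ≠ b := by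
  intro he; subst he; rw [pvTripLt_irrefl] at h; exact Bool.false_ne_true h

-- uniqueness of the strictly sorted arrangement: two pvTripLt-sorted lists with the same members are equal
lemma pvSorted_unique {l₁ l₂ : List (String × String × String)}
    (h₁ : l₁.Pairwise (fun a b => pvTripLt a b = true))
    (h₂ : l₂.Pairwise (fun a b => pvTripLt a b = true))
    (hm : ∀ z, z ∈ l₁ ↔ z ∈ l₂) : l₁ = l₂ := by
  have n₁ : l₁.Nodup := h₁.imp (fun h => pvTripLt_ne h)
  have n₂ : l₂.Nodup := h₂.imp (fun h => pvTripLt_ne h)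
  have hp : l₁.Perm l₂ := (List.perm_ext_iff_of_nodup n₁ n₂).mpr hm
  exact List.Perm.eq_of_pairwise
    (fun a b _ _ hab hba => absurd hab (by rw [pvTripLt_asymm hba]; exact Bool.false_ne_true))
    h₁ h₂ hp

lemma mem_foldl_insertBy {α : Type} (f : α → α → Bool) (xs : List α) (acc : List α) (y : α) :
    y ∈ xs.foldl (fun acc x => PySem.List.insertBy f x acc) acc ↔ y ∈ acc ∨ y ∈ xs := by
  induction xs generalizing acc with
  | nil => simp
  | cons x xs ih => simp [List.foldl_cons, ih, PySem.List.mem_insertBy]; tauto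

lemma mem_pvSortTrip (xs : List (String × String × String)) (y : String × String × String) :
    y ∈ pvSortTrip xs ↔ y ∈ xs := by
  unfold pvSortTrip; rw [mem_foldl_insertBy]; simp

-- inserting a fresh element keeps a pvTripLt-sorted list sorted
lemma pairwise_insertBy {x : String × String × String} {l : List (String × String × String)}
    (hl : l.Pairwise (fun a b => pvTripLt a b = true)) (hx : x ∉ l) :
    (PySem.List.insertBy pvTripLt x l).Pairwise (fun a b => pvTripLt a b = true) := by
  induction l with
  | nil => simp [PySem.List.insertBy]
  | cons y ys ih =>
    rw [List.pairwise_cons] at hl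
    obtain ⟨hy, hys⟩ := hl
    by_cases hxy : pvTripLt x y = true
    · rw [show PySem.List.insertBy pvTripLt x (y :: ys) = x :: y :: ys from by
        simp [PySem.List.insertBy, hxy]]
      refine List.Pairwise.cons ?_ (List.Pairwise.cons hy hys)
      intro z hz
      rcases List.mem_cons.mp hz with rfl | hz
      · exact hxy
      · exact pvTripLt_trans hxy (hy z hz)
    · rw [show PySem.List.insertBy pvTripLt x (y :: ys) = y :: PySem.List.insertBy pvTripLt x ys from by
        simp [PySem.List.insertBy, hxy]]
      have hne : y ≠ x := fun he => hx (he ▸ List.mem_cons_self)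
      have hyx : pvTripLt y x = true := by
        rcases pvTripLt_total hne.symm with h | h
        · exact absurd h hxy
        · exact h
      refine List.Pairwise.cons ?_ (ih hys (fun hm => hx (List.mem_cons_of_mem _ hm)))
      intro z hz
      rw [PySem.List.mem_insertBy] at hz
      rcases hz with rfl | hz
      · exact hyx
      · exact hy z hz

-- the insertion sort of a duplicate-free list is strictly pvTripLt-sorted
lemma pvSortTrip_pairwise_aux (xs acc : List (String × String × String))
    (hacc : acc.Pairwise (fun a b => pvTripLt a b = true))
    (hdisj : ∀ z ∈ acc, z ∉ xs) (hnd : xs.Nodup) :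
    (xs.foldl (fun acc x => PySem.List.insertBy pvTripLt x acc) acc).Pairwise
      (fun a b => pvTripLt a b = true) := by
  induction xs generalizing acc with
  | nil => simpa using hacc
  | cons x xs ih =>
    rw [List.nodup_cons] at hnd
    rw [List.foldl_cons]
    refine ih _ (pairwise_insertBy hacc (fun hm => hdisj x hm List.mem_cons_self)) ?_ hnd.2
    intro z hz
    rw [PySem.List.mem_insertBy] at hz
    rcases hz with rfl | hz
    · exact hnd.1
    · exact fun hm => hdisj z hz (List.mem_cons_of_mem _ hm)

lemma pvSortTrip_pairwise (xs : List (String × String × String)) (h : xs.Nodup) :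
    (pvSortTrip xs).Pairwise (fun a b => pvTripLt a b = true) :=
  pvSortTrip_pairwise_aux xs [] (by simp) (by simp) h

-- invariant of B's single pass: memberships of the three state components, and sortedness of both outputs
lemma pvBLoop_spec (cbi : List (String × String × String))
    (xs : List (String × String × String))
    (st : PySem.Set (String × String × String) × List (String × String × String) × List (String × String × String))
    (h1 : ∀ z, z ∈ st.1 ↔ z ∈ st.2.1 ∨ z ∈ st.2.2)
    (h2 : ∀ z ∈ st.2.1, (PySem.Set.ofList (cbi.map (fun t => t.1))).contains z.1 = true ∧ z ∉ cbi)
    (h3 : ∀ z ∈ st.2.2, (PySem.Set.ofList (cbi.map (fun t => t.1))).contains z.1 = false ∧ z ∉ cbi)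
    (h4 : st.2.1.Pairwise (fun a b => pvTripLt a b = true))
    (h5 : st.2.2.Pairwise (fun a b => pvTripLt a b = true)) :
    (∀ z, z ∈ (xs.foldl (pvBStep (PySem.Set.ofList cbi) (PySem.Set.ofList (cbi.map (fun t => t.1)))) st).2.1 ↔ z ∈ st.2.1 ∨ (z ∈ xs ∧ z ∉ cbi ∧ (PySem.Set.ofList (cbi.map (fun t => t.1))).contains z.1 = true)) ∧
    (∀ z, z ∈ (xs.foldl (pvBStep (PySem.Set.ofList cbi) (PySem.Set.ofList (cbi.map (fun t => t.1)))) st).2.2 ↔ z ∈ st.2.2 ∨ (z ∈ xs ∧ z ∉ cbi ∧ (PySem.Set.ofList (cbi.map (fun t => t.1))).contains z.1 = false)) ∧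
    (xs.foldl (pvBStep (PySem.Set.ofList cbi) (PySem.Set.ofList (cbi.map (fun t => t.1)))) st).2.1.Pairwise (fun a b => pvTripLt a b = true) ∧
    (xs.foldl (pvBStep (PySem.Set.ofList cbi) (PySem.Set.ofList (cbi.map (fun t => t.1)))) st).2.2.Pairwise (fun a b => pvTripLt a b = true) := by
  induction xs generalizing st with
  | nil =>
    refine ⟨fun z => by simp, fun z => by simp, by simpa using h4, by simpa using h5⟩
  | cons t ts ih =>
    simp only [List.foldl_cons]
    set idc := PySem.Set.ofList (cbi.map (fun t => t.1)) with hidc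
    by_cases hskip : (PySem.Set.contains st.1 t || PySem.Set.contains (PySem.Set.ofList cbi) t) = true
    · -- t skipped: state unchanged
      have hstep : pvBStep (PySem.Set.ofList cbi) idc st t = st := by
        unfold pvBStep; rw [if_pos hskip]
      rw [hstep]
      obtain ⟨m1, m2, p1, p2⟩ := ih st h1 h2 h3 h4 h5
      refine ⟨fun z => ?_, fun z => ?_, p1, p2⟩
      · rw [m1]
        constructor
        · rintro (hz | ⟨hz1, hz2, hz3⟩)
          · exact Or.inl hz
          · exact Or.inr ⟨List.mem_cons_of_mem _ hz1, hz2, hz3⟩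
        · rintro (hz | ⟨hz1, hz2, hz3⟩)
          · exact Or.inl hz
          · rcases List.mem_cons.mp hz1 with rfl | hz1
            · -- z = t was skipped: it is already in expanded (since it is not old and not emergent)
              rw [Bool.or_eq_true, PySem.Set.contains_iff, PySem.Set.contains_iff, PySem.Set.mem_ofList] at hskip
              rcases hskip with hseen | hold
              · rcases (h1 z).mp hseen with hin | hin
                · exact Or.inl hin
                · exact absurd hz3 (by rw [(h3 z hin).1]; decide)
              · exact absurd hold hz2
            · exact Or.inr ⟨hz1, hz2, hz3⟩
      · rw [m2]
        constructor
        · rintro (hz | ⟨hz1, hz2, hz3⟩)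
          · exact Or.inl hz
          · exact Or.inr ⟨List.mem_cons_of_mem _ hz1, hz2, hz3⟩
        · rintro (hz | ⟨hz1, hz2, hz3⟩)
          · exact Or.inl hz
          · rcases List.mem_cons.mp hz1 with rfl | hz1
            · rw [Bool.or_eq_true, PySem.Set.contains_iff, PySem.Set.contains_iff, PySem.Set.mem_ofList] at hskip
              rcases hskip with hseen | hold
              · rcases (h1 z).mp hseen with hin | hin
                · exact absurd hz3 (by rw [(h2 z hin).1]; decide)
                · exact Or.inl hin
              · exact absurd hold hz2
            · exact Or.inr ⟨hz1, hz2, hz3⟩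
    · -- t is new: add to seen and insert into the matching output
      have hnotseen : t ∉ st.1 := by
        intro hm
        exact hskip (by rw [Bool.or_eq_true, PySem.Set.contains_iff]; exact Or.inl hm)
      have hnotold : t ∉ cbi := by
        intro hm
        exact hskip (by rw [Bool.or_eq_true, PySem.Set.contains_iff, PySem.Set.contains_iff, PySem.Set.mem_ofList]; exact Or.inr hm)
      have hstep : pvBStep (PySem.Set.ofList cbi) idc st t =
          (PySem.Set.add st.1 t,
           if PySem.Set.contains idc t.1 then (PySem.List.insertBy pvTripLt t st.2.1, st.2.2)
           else (st.2.1, PySem.List.insertBy pvTripLt t st.2.2)) := by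
        unfold pvBStep
        rw [if_neg (by simpa using hskip)]
      rw [hstep]
      by_cases hp : PySem.Set.contains idc t.1 = true
      · rw [if_pos hp]
        have ht1 : t ∉ st.2.1 := fun hm => hnotseen ((h1 t).mpr (Or.inl hm))
        obtain ⟨m1, m2, p1, p2⟩ := ih (PySem.Set.add st.1 t, PySem.List.insertBy pvTripLt t st.2.1, st.2.2)
          (fun z => by
            simp only [PySem.Set.mem_add, PySem.List.mem_insertBy]
            rw [h1 z]; tauto)
          (fun z hz => by
            rcases (PySem.List.mem_insertBy _ _ _ _).mp hz with rfl | hz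
            · exact ⟨hp, hnotold⟩
            · exact h2 z hz)
          h3 (pairwise_insertBy h4 ht1) h5
        refine ⟨fun z => ?_, fun z => ?_, p1, p2⟩
        · rw [m1]
          simp only [PySem.List.mem_insertBy, List.mem_cons]
          constructor
          · rintro ((rfl | hz) | ⟨hz1, hz2, hz3⟩)
            · exact Or.inr ⟨Or.inl rfl, hnotold, hp⟩
            · exact Or.inl hz
            · exact Or.inr ⟨Or.inr hz1, hz2, hz3⟩
          · rintro (hz | ⟨rfl | hz1, hz2, hz3⟩)
            · exact Or.inl (Or.inr hz)
            · exact Or.inl (Or.inl rfl)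
            · exact Or.inr ⟨hz1, hz2, hz3⟩
        · rw [m2]
          simp only [List.mem_cons]
          constructor
          · rintro (hz | ⟨hz1, hz2, hz3⟩)
            · exact Or.inl hz
            · exact Or.inr ⟨Or.inr hz1, hz2, hz3⟩
          · rintro (hz | ⟨rfl | hz1, hz2, hz3⟩)
            · exact Or.inl hz
            · exact absurd hp (by rw [hz3]; exact Bool.false_ne_true)
            · exact Or.inr ⟨hz1, hz2, hz3⟩
      · rw [if_neg hp]
        have hpf : PySem.Set.contains idc t.1 = false := by
          cases h : PySem.Set.contains idc t.1
          · rfl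
          · exact absurd h hp
        have ht2 : t ∉ st.2.2 := fun hm => hnotseen ((h1 t).mpr (Or.inr hm))
        obtain ⟨m1, m2, p1, p2⟩ := ih (PySem.Set.add st.1 t, st.2.1, PySem.List.insertBy pvTripLt t st.2.2)
          (fun z => by
            simp only [PySem.Set.mem_add, PySem.List.mem_insertBy]
            rw [h1 z]; tauto)
          h2
          (fun z hz => by
            rcases (PySem.List.mem_insertBy _ _ _ _).mp hz with rfl | hz
            · exact ⟨hpf, hnotold⟩
            · exact h3 z hz)
          h4 (pairwise_insertBy h5 ht2)
        refine ⟨fun z => ?_, fun z => ?_, p1, p2⟩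
        · rw [m1]
          simp only [List.mem_cons]
          constructor
          · rintro (hz | ⟨hz1, hz2, hz3⟩)
            · exact Or.inl hz
            · exact Or.inr ⟨Or.inr hz1, hz2, hz3⟩
          · rintro (hz | ⟨rfl | hz1, hz2, hz3⟩)
            · exact Or.inl hz
            · exact absurd hz3 (by rw [hpf]; exact Bool.false_ne_true)
            · exact Or.inr ⟨hz1, hz2, hz3⟩
        · rw [m2]
          simp only [PySem.List.mem_insertBy, List.mem_cons]
          constructor
          · rintro ((rfl | hz) | ⟨hz1, hz2, hz3⟩)
            · exact Or.inr ⟨Or.inl rfl, hnotold, hpf⟩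
            · exact Or.inl hz
            · exact Or.inr ⟨Or.inr hz1, hz2, hz3⟩
          · rintro (hz | ⟨rfl | hz1, hz2, hz3⟩)
            · exact Or.inl (Or.inr hz)
            · exact Or.inl (Or.inl rfl)
            · exact Or.inr ⟨hz1, hz2, hz3⟩

-- for a new tuple z (z ∈ cbc), membership of z.1 in A's new_clusters list is the negation of the id-side cluster test
lemma pvNewClusters_key (cbc cbi : List (String × String × String))
    (z : String × String × String) (hz : z ∈ cbc) :
    ((PySem.List.sorted (PySem.Set.diff (PySem.Set.ofList (cbc.map (fun t => t.1))) (cbi.map (fun t => t.1))) (fun s => s) false).contains z.1)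
      = !((PySem.Set.ofList (cbi.map (fun t => t.1))).contains z.1) := by
  have h1 : z.1 ∈ cbc.map (fun t => t.1) := List.mem_map_of_mem hz
  by_cases hm : z.1 ∈ cbi.map (fun t => t.1)
  · have hL : ¬ z.1 ∈ PySem.List.sorted (PySem.Set.diff (PySem.Set.ofList (cbc.map (fun t => t.1))) (cbi.map (fun t => t.1))) (fun s => s) false := by
      rw [PySem.List.mem_sorted, PySem.Set.mem_diff]
      tauto
    simp [hL, PySem.Set.mem_ofList, hm]
  · have hL : z.1 ∈ PySem.List.sorted (PySem.Set.diff (PySem.Set.ofList (cbc.map (fun t => t.1))) (cbi.map (fun t => t.1))) (fun s => s) false := by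
      rw [PySem.List.mem_sorted, PySem.Set.mem_diff, PySem.Set.mem_ofList]
      exact ⟨h1, hm⟩
    simp [hL, PySem.Set.mem_ofList, hm]

-- ===== VERDICT (by name: the statement is the Claim_ definition above) =====
theorem get_expanded_and_emergent_bp_clusters_py_spec : Claim_equal_get_expanded_and_emergent_bp_clusters_py := by
  intro cbc cbi _
  unfold Spec_get_expanded_and_emergent_bp_clusters_py
  unfold get_expanded_and_emergent_bp_clusters_py get_expanded_and_emergent_bp_clusters_py_alt
  by_cases h : cbc.length > cbi.length
  · simp only [h, if_pos]
    -- B's loop result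
    obtain ⟨m1, m2, p1, p2⟩ := pvBLoop_spec cbi cbc (PySem.Set.empty, [], [])
      (fun z => by simp [PySem.Set.empty]) (fun z hz => absurd hz (List.not_mem_nil))
      (fun z hz => absurd hz (List.not_mem_nil)) (by simp) (by simp)
    -- A's sorted difference
    have hndD : (PySem.Set.diff (PySem.Set.ofList cbc) cbi).Nodup :=
      PySem.Set.nodup_diff _ _ (PySem.Set.nodup_ofList cbc)
    have hpw := pvSortTrip_pairwise _ hndD
    have hmemD : ∀ z, z ∈ pvSortTrip (PySem.Set.diff (PySem.Set.ofList cbc) cbi) ↔ z ∈ cbc ∧ z ∉ cbi := by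
      intro z
      rw [mem_pvSortTrip, PySem.Set.mem_diff, PySem.Set.mem_ofList]
    refine Prod.ext ?_ ?_
    · -- expanded component
      refine pvSorted_unique (hpw.filter _) p1 ?_
      intro z
      rw [List.mem_filter, m1]
      simp only [List.not_mem_nil, false_or]
      constructor
      · rintro ⟨hz, hf⟩
        obtain ⟨hzc, hzi⟩ := (hmemD z).mp hz
        rw [pvNewClusters_key cbc cbi z hzc, Bool.not_eq_eq_eq_not, Bool.not_true] at hf
        rw [Bool.not_eq_false'] at hf
        exact ⟨hzc, hzi, hf⟩
      · rintro ⟨hzc, hzi, hp⟩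
        refine ⟨(hmemD z).mpr ⟨hzc, hzi⟩, ?_⟩
        rw [pvNewClusters_key cbc cbi z hzc, hp]
        rfl
    · -- emergent component
      refine pvSorted_unique (hpw.filter _) p2 ?_
      intro z
      rw [List.mem_filter, m2]
      simp only [List.not_mem_nil, false_or]
      constructor
      · rintro ⟨hz, hf⟩
        obtain ⟨hzc, hzi⟩ := (hmemD z).mp hz
        rw [pvNewClusters_key cbc cbi z hzc, Bool.not_eq_true'] at hf
        exact ⟨hzc, hzi, hf⟩
      · rintro ⟨hzc, hzi, hp⟩
        refine ⟨(hmemD z).mpr ⟨hzc, hzi⟩, ?_⟩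
        rw [pvNewClusters_key cbc cbi z hzc, hp]
        rfl
  · simp [h]
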